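-- pv_equiv track=rewrite | github.com/finwarman/advent-of-code-2024 | 12/solution.py | part_1_cost
-- ===== SOURCE A (Python) =====
-- DIRS = [(-1, 0), (0, 1), (1, 0), (0, -1)]
--
-- def part_1_cost(grid, regions):
--     total_cost = 0
--
--     for region in regions:
--         cells, label = region
--         perimeter = 0
--
--         for x, y in cells:
--             for dx, dy in DIRS:
--                 nx, ny = x + dx, y + dy
--                 # if neighbor is out of bounds or a different type
--                 if not (0 <= nx < len(grid) and 0 <= ny < len(grid[0])) or grid[nx][ny] != label:
--                     perimeter += 1
--
--         area = len(cells)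
--         total_cost += area * perimeter
--
--     return total_cost
-- ===== SOURCE B (Python) =====
-- def part_1_cost(grid, regions):
--     h = len(grid)
--     w = len(grid[0]) if grid else 0
--     total = 0
--     for cells, label in regions:
--         # multiset (dict) of neighbor positions with multiplicities
--         nbrs = {}
--         for x, y in cells:
--             for p in ((x - 1, y), (x, y + 1), (x + 1, y), (x, y - 1)):
--                 nbrs[p] = nbrs.get(p, 0) + 1
--         perimeter = 0
--         for (nx, ny), k in nbrs.items():
--             if not (0 <= nx < h and 0 <= ny < w) or grid[nx][ny] != label:
--                 perimeter += k
--         total += len(cells) * perimeter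
--     return total
-- ===== Notes on version B (the rewrite author's own statement) =====
-- stated objective: alternative
-- what changed: B first builds, per region, a dict multiset of all neighbor positions with multiplicities, then makes one bounds+grid check per DISTINCT neighbor position and adds its multiplicity to the perimeter, instead of A's per-(cell,direction) check against the grid.
import Mathlib
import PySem

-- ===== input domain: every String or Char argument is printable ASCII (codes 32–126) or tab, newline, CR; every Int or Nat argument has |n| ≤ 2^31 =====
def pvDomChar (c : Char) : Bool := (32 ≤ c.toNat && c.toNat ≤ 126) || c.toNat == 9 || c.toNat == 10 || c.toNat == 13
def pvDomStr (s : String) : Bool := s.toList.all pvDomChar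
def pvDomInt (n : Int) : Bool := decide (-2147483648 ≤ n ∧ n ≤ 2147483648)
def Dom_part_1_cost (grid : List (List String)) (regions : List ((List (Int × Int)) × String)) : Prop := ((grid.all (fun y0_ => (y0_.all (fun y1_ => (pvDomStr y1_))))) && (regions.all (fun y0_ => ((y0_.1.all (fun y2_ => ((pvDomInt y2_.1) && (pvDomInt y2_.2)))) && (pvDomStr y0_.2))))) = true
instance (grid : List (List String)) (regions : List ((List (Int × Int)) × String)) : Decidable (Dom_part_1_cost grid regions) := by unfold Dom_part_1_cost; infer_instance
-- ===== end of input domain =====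

-- B builds, per region, a dict multiset of all neighbor positions and then performs one
-- bounds+grid check per DISTINCT neighbor position (weighted by multiplicity), instead of
-- A's check per (cell, direction) pair (objective: alternative).

-- DIRS = [(-1, 0), (0, 1), (1, 0), (0, -1)]
def pvDIRS : List (Int × Int) := [(-1, 0), (0, 1), (1, 0), (0, -1)]

-- ===== PORT A =====
-- len(grid[0]) as A evaluates it (0 when it is never reached because the guard already failed)
def pvW0 (grid : List (List String)) : Int := (((PySem.List.pyGet? grid 0).getD []).length : Int)

-- grid[nx][ny] at position p (none exactly where Python raises IndexError)
def pvLook (grid : List (List String)) (p : Int × Int) : Option String :=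
  (PySem.List.pyGet? grid p.1).bind (fun row => PySem.List.pyGet? row p.2)

-- 'not (0 <= nx < h and 0 <= ny < w) or grid[nx][ny] != label' at neighbor position p
def pvFail (grid : List (List String)) (h w : Int) (label : String) (p : Int × Int) : Bool :=
  !(decide (0 ≤ p.1) && decide (p.1 < h) && decide (0 ≤ p.2) && decide (p.2 < w)) ||
  !(pvLook grid p == some label)

def part_1_cost (grid : List (List String)) (regions : List ((List (Int × Int)) × String)) : Int :=
  regions.foldl (fun total_cost region =>
    let cells := region.1
    let label := region.2
    let perimeter : Int := cells.foldl (fun p c =>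
      pvDIRS.foldl (fun p d =>
        if pvFail grid (grid.length : Int) (pvW0 grid) label (c.1 + d.1, c.2 + d.2)
        then p + 1 else p) p) 0
    let area : Int := cells.length
    total_cost + area * perimeter) 0

-- ===== PORT B =====
-- the four neighbor positions of a cell, in B's tuple order
def pvNbrs4 (c : Int × Int) : List (Int × Int) :=
  [(c.1 - 1, c.2), (c.1, c.2 + 1), (c.1 + 1, c.2), (c.1, c.2 - 1)]

def part_1_cost_alt (grid : List (List String)) (regions : List ((List (Int × Int)) × String)) : Int :=
  let h : Int := grid.length
  let w : Int := if grid.isEmpty then 0 else pvW0 grid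
  regions.foldl (fun total region =>
    let cells := region.1
    let label := region.2
    let nbrs : PySem.Dict (Int × Int) Int :=
      cells.foldl (fun d c =>
        (pvNbrs4 c).foldl (fun d p => d.insert p (d.getD p 0 + 1)) d) PySem.Dict.empty
    let perimeter : Int := nbrs.items.foldl (fun s pk =>
      if pvFail grid h w label pk.1 then s + pk.2 else s) 0
    total + (cells.length : Int) * perimeter) 0

-- ===== PRECONDITION & SPEC =====
-- Pre_ excludes exactly the inputs where Python raises IndexError: a cell's neighbor passes A's
-- bounds check against len(grid) and len(grid[0]) but the actual row (of a ragged grid) is shorter.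
def Pre_part_1_cost (grid : List (List String)) (regions : List ((List (Int × Int)) × String)) : Prop :=
  (regions.all (fun region => region.1.all (fun c => pvDIRS.all (fun d =>
    !(decide (0 ≤ c.1 + d.1) && decide (c.1 + d.1 < (grid.length : Int)) &&
      decide (0 ≤ c.2 + d.2) && decide (c.2 + d.2 < pvW0 grid)) ||
    decide (c.2 + d.2 < (((PySem.List.pyGet? grid (c.1 + d.1)).getD []).length : Int)))))) = true
instance (grid : List (List String)) (regions : List ((List (Int × Int)) × String)) : Decidable (Pre_part_1_cost grid regions) := by unfold Pre_part_1_cost; infer_instance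

def pvWitness_part_1_cost : List (List String) × (List ((List (Int × Int)) × String)) :=
  ([["A", "B"], ["A", "A"]], [([(0, 0), (1, 0), (1, 1)], "A"), ([(0, 1)], "B")])

def Spec_part_1_cost (grid : List (List String)) (regions : List ((List (Int × Int)) × String)) (out : Int) : Prop := out = part_1_cost_alt grid regions
instance (grid : List (List String)) (regions : List ((List (Int × Int)) × String)) (out : Int) : Decidable (Spec_part_1_cost grid regions out) := by unfold Spec_part_1_cost; infer_instance

-- ===== CLAIM (what is proved, stated in full; the proofs are below) =====
def Claim_equal_part_1_cost : Prop := ∀ (grid : List (List String)) (regions : List ((List (Int × Int)) × String)), Dom_part_1_cost grid regions → Pre_part_1_cost grid regions → Spec_part_1_cost grid regions (part_1_cost grid regions)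

-- ===== LEMMAS AND PROOFS =====

-- B's local 'w' is A's len(grid[0]) bound in every case
lemma pvW_eq (grid : List (List String)) : (if grid.isEmpty then (0 : Int) else pvW0 grid) = pvW0 grid := by
  cases grid <;> rfl

-- B's dict is the counter of the flattened neighbor list
lemma nbrs_eq_counter (cells : List (Int × Int)) :
    cells.foldl (fun d c =>
        (pvNbrs4 c).foldl (fun d p => d.insert p (d.getD p 0 + 1)) d) PySem.Dict.empty
      = PySem.Dict.counter (cells.flatMap pvNbrs4) := by
  rw [← PySem.Dict.foldl_insert_getD_add_one_eq_counter, List.foldl_flatMap]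

-- splitting a 0/1-weighted sum step into foldl_add shape
lemma foldl_if_add (F : (Int × Int) → Bool) (l : List ((Int × Int) × Int)) (a : Int) :
    l.foldl (fun s pk => if F pk.1 then s + pk.2 else s) a
      = a + (l.map (fun pk => if F pk.1 then pk.2 else 0)).sum := by
  have : (fun (s : Int) (pk : (Int × Int) × Int) => if F pk.1 then s + pk.2 else s)
      = fun s pk => s + (if F pk.1 then pk.2 else 0) := by
    funext s pk
    by_cases h : F pk.1 <;> simp [h]
  rw [this, PySem.List.foldl_add]

-- Σ over a nodup index set covering L of (if F k then L.count k else 0) = L.countP F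
lemma sum_count_eq_countP (F : (Int × Int) → Bool) (S L : List (Int × Int))
    (hnd : S.Nodup) (hcov : ∀ x ∈ L, x ∈ S) :
    (S.map (fun k => if F k then (L.count k : Int) else 0)).sum = (L.countP F : Int) := by
  induction L with
  | nil => simp
  | cons x L ih =>
      have hx : x ∈ S := hcov x (List.mem_cons_self)
      have hc : ∀ y ∈ L, y ∈ S := fun y hy => hcov y (List.mem_cons_of_mem _ hy)
      have h1 : ∀ k, (if F k then ((x :: L).count k : Int) else 0)
          = (if F k then (L.count k : Int) else 0) + (if F k && (k == x) then 1 else 0) := by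
        intro k
        by_cases hF : F k
        · by_cases hkx : k = x
          · subst hkx; simp [hF, List.count_cons]
          · simp [hF, List.count_cons, hkx, Ne.symm hkx]
        · simp [hF]
      have h2 : (S.map (fun k => if F k && (k == x) then (1 : Int) else 0)).sum
          = if F x then 1 else 0 := by
        rw [PySem.List.sum_map_ite_one_zero]
        by_cases hF : F x
        · have : S.countP (fun k => F k && (k == x)) = S.countP (fun k => k == x) := by
            apply List.countP_congr
            intro k hk
            constructor
            · intro h; exact (Bool.and_elim_right h)
            · intro h
              have : k = x := by simpa using h
              subst this; simp [hF]
          rw [this]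
          have : S.countP (fun k => k == x) = S.count x := rfl
          rw [this, List.count_eq_one_of_mem hnd hx]
          simp [hF]
        · have : S.countP (fun k => F k && (k == x)) = 0 := by
            rw [List.countP_eq_zero]
            intro k hk hcontra
            have hkx : k = x := by
              have := Bool.and_elim_right hcontra
              simpa using this
            subst hkx
            exact hF (Bool.and_elim_left hcontra)
          rw [this]; simp [hF]
      simp only [h1]
      rw [PySem.List.sum_map_add_int, ih hc, h2, List.countP_cons]
      by_cases hF : F x <;> simp [hF]
  
-- countP over the flattened neighbor list, cell by cell
lemma countP_flatMap_nbrs (F : (Int × Int) → Bool) (cells : List (Int × Int)) :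
    ((cells.flatMap pvNbrs4).countP F : Int)
      = (cells.map (fun c => ((pvNbrs4 c).countP F : Int))).sum := by
  induction cells with
  | nil => simp
  | cons c cs ih =>
      simp only [List.flatMap_cons, List.countP_append, List.map_cons, List.sum_cons, ← ih]
      push_cast; ring

-- per cell: A's per-direction mismatch count is the countP over B's neighbor list
lemma cell_count_eq (F : (Int × Int) → Bool) (c : Int × Int) :
    pvDIRS.countP (fun d => F (c.1 + d.1, c.2 + d.2)) = (pvNbrs4 c).countP F := by
  have h1 : c.1 + (-1 : Int) = c.1 - 1 := by ring
  have h2 : c.2 + (-1 : Int) = c.2 - 1 := by ring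
  simp [pvDIRS, pvNbrs4, List.countP_cons, h1, h2]

-- per region: A's perimeter equals B's perimeter
lemma region_eq (grid : List (List String)) (label : String) (cells : List (Int × Int)) :
    cells.foldl (fun p c =>
        pvDIRS.foldl (fun p d =>
          if pvFail grid (grid.length : Int) (pvW0 grid) label (c.1 + d.1, c.2 + d.2)
          then p + 1 else p) p) 0
      = (PySem.Dict.counter (cells.flatMap pvNbrs4)).items.foldl (fun s pk =>
          if pvFail grid (grid.length : Int) (pvW0 grid) label pk.1 then s + pk.2 else s) 0 := by
  set F : (Int × Int) → Bool := pvFail grid (grid.length : Int) (pvW0 grid) label with hF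
  set L : List (Int × Int) := cells.flatMap pvNbrs4 with hL
  -- B side: sum over distinct neighbors weighted by multiplicity = countP F L
  rw [foldl_if_add, PySem.Dict.items_counter]
  rw [List.map_map]
  have hb : ((PySem.Set.ofList L).map
      ((fun pk : (Int × Int) × Int => if F pk.1 then pk.2 else 0) ∘
        fun k => (k, (L.count k : Int)))).sum = (L.countP F : Int) := by
    have : ((fun pk : (Int × Int) × Int => if F pk.1 then pk.2 else 0) ∘
        fun k => (k, (L.count k : Int))) = fun k => if F k then (L.count k : Int) else 0 := rfl
    rw [this]
    exact sum_count_eq_countP F _ L (PySem.Set.nodup_ofList L)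
      (fun x hx => (PySem.Set.mem_ofList L x).mpr hx)
  rw [hb, zero_add]
  -- A side: nested foldl = Σ_c countP over directions = countP F L
  simp only [PySem.List.foldl_if_add_one, PySem.List.foldl_add]
  rw [countP_flatMap_nbrs]
  simp only [← cell_count_eq F]
  simp

-- ===== VERDICT (by name: the statement is the Claim_ definition above) =====
theorem part_1_cost_spec : Claim_equal_part_1_cost := by
  intro grid regions _ _
  unfold Spec_part_1_cost part_1_cost part_1_cost_alt
  simp only [pvW_eq, nbrs_eq_counter]
  apply PySem.List.foldl_congr_mem
  intro total region _
  exact congrArg (fun z => total + (region.1.length : Int) * z) (region_eq grid region.2 region.1)
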